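-- pv_equiv track=rewrite | github.com/nossas/bonde-apis | action-network/an/normalize/utils.py | find_by_ddd
-- ===== SOURCE A (Python) =====
-- def find_by_ddd(ddd):
--     """Return state by DDD"""
--     states = dict(
--       DF=['61', 'Distrito Federal'],
--       GO=['62','64', 'Goiania', 'Goiânia'],
--       MT=['65','66', 'Mato Grosso'],
--       MS=['67', 'Mato Grosso do Sul'],
--       AL=['82', 'Alagoas'],
--       BA=['71','73','74','75','77', 'Bahia'],
--       CE=['85','88', 'Ceará', 'Ceara'],
--       MA=['98','99', 'Maranhão', 'Maranhao'],
--       PB=['83', 'Paraíba', 'Paraiba'],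
--       PE=['81','87', 'Pernambuco'],
--       PI=['86','89', 'Piauí', 'Piaui'],
--       RN=['84', 'Rio Grande do Norte'],
--       SE=['79', 'Sergipe'],
--       AC=['68', 'Acre'],
--       AP=['96', 'Amapá', 'Amapa'],
--       AM=['92','97', 'Amazonas'],
--       PA=['91','93','94', 'Para', 'Pará'],
--       RO=['69', 'Rondônia', 'Rondonia'],
--       RR=['95', 'Roraima'],
--       TO=['63', 'Tocantins'],
--       ES=['27','28', 'Espírito Santo', 'Espirito Santo'],
--       MG=['31','32','33','34','35','37','38', 'Minas Gerais'],
--       RJ=['21','22','24', 'Rio de Janeiro'],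
--       SP=['11','12','13','14','15','16','17','18','19', 'São Paulo', 'Sao Paulo'],
--       PR=['41','42','43','44','45','46', 'Paraná', 'Parana'],
--       RS=['51','53','54','55', 'Rio Grande do Sul'],
--       SC=['47','48','49', 'Santa Catarina']
--     )
--
--     state = ddd
--
--     for index, values in enumerate(states.values()):
--         if ddd in values:
--             state = list(states.keys())[index]
--             break
--
--     return state
-- ===== SOURCE B (Python) =====
-- # Reverse index precomputed once: every area code and state name maps straight
-- # to its abbreviation; unknown input falls through unchanged.
-- _STATE_BY_ALIAS = {
--     '61': 'DF', 'Distrito Federal': 'DF',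
--     '62': 'GO', '64': 'GO', 'Goiania': 'GO', 'Goiânia': 'GO',
--     '65': 'MT', '66': 'MT', 'Mato Grosso': 'MT',
--     '67': 'MS', 'Mato Grosso do Sul': 'MS',
--     '82': 'AL', 'Alagoas': 'AL',
--     '71': 'BA', '73': 'BA', '74': 'BA', '75': 'BA', '77': 'BA', 'Bahia': 'BA',
--     '85': 'CE', '88': 'CE', 'Ceará': 'CE', 'Ceara': 'CE',
--     '98': 'MA', '99': 'MA', 'Maranhão': 'MA', 'Maranhao': 'MA',
--     '83': 'PB', 'Paraíba': 'PB', 'Paraiba': 'PB',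
--     '81': 'PE', '87': 'PE', 'Pernambuco': 'PE',
--     '86': 'PI', '89': 'PI', 'Piauí': 'PI', 'Piaui': 'PI',
--     '84': 'RN', 'Rio Grande do Norte': 'RN',
--     '79': 'SE', 'Sergipe': 'SE',
--     '68': 'AC', 'Acre': 'AC',
--     '96': 'AP', 'Amapá': 'AP', 'Amapa': 'AP',
--     '92': 'AM', '97': 'AM', 'Amazonas': 'AM',
--     '91': 'PA', '93': 'PA', '94': 'PA', 'Para': 'PA', 'Pará': 'PA',
--     '69': 'RO', 'Rondônia': 'RO', 'Rondonia': 'RO',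
--     '95': 'RR', 'Roraima': 'RR',
--     '63': 'TO', 'Tocantins': 'TO',
--     '27': 'ES', '28': 'ES', 'Espírito Santo': 'ES', 'Espirito Santo': 'ES',
--     '31': 'MG', '32': 'MG', '33': 'MG', '34': 'MG', '35': 'MG', '37': 'MG', '38': 'MG', 'Minas Gerais': 'MG',
--     '21': 'RJ', '22': 'RJ', '24': 'RJ', 'Rio de Janeiro': 'RJ',
--     '11': 'SP', '12': 'SP', '13': 'SP', '14': 'SP', '15': 'SP', '16': 'SP', '17': 'SP', '18': 'SP', '19': 'SP', 'São Paulo': 'SP', 'Sao Paulo': 'SP',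
--     '41': 'PR', '42': 'PR', '43': 'PR', '44': 'PR', '45': 'PR', '46': 'PR', 'Paraná': 'PR', 'Parana': 'PR',
--     '51': 'RS', '53': 'RS', '54': 'RS', '55': 'RS', 'Rio Grande do Sul': 'RS',
--     '47': 'SC', '48': 'SC', '49': 'SC', 'Santa Catarina': 'SC',
-- }
--
--
-- def find_by_ddd(ddd):
--     """Return state by DDD"""
--     return _STATE_BY_ALIAS.get(ddd, ddd)
-- ===== Notes on version B (the rewrite author's own statement) =====
-- stated objective: idiomatic
-- what changed: Replaces the enumerate-over-values scan that reindexes into keys() with a flat precomputed reverse-lookup dict (alias -> state abbreviation), so the answer is a single _STATE_BY_ALIAS.get(ddd, ddd).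
import Mathlib
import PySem

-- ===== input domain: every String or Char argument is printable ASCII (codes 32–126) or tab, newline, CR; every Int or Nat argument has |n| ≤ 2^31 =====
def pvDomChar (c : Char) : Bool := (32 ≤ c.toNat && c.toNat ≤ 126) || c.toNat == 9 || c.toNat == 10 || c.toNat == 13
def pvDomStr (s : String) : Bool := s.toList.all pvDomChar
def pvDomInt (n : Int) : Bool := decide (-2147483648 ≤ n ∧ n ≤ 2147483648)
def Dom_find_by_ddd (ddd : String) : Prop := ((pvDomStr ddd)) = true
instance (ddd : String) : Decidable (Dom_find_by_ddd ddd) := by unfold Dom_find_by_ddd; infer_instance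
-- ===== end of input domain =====

-- B replaces A's dict-of-lists plus enumerate-scan (indexing back into keys()) by a flat
-- precomputed reverse-lookup dict alias -> abbreviation, answered by a single
-- lookup.get(ddd, ddd) — idiomatic, same values everywhere.

-- ===== PORT A =====
-- A's `states` table, written out literally:
def pvStates : List (String × List String) :=
  [("DF", ["61", "Distrito Federal"]),
   ("GO", ["62", "64", "Goiania", "Goiânia"]),
   ("MT", ["65", "66", "Mato Grosso"]),
   ("MS", ["67", "Mato Grosso do Sul"]),
   ("AL", ["82", "Alagoas"]),
   ("BA", ["71", "73", "74", "75", "77", "Bahia"]),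
   ("CE", ["85", "88", "Ceará", "Ceara"]),
   ("MA", ["98", "99", "Maranhão", "Maranhao"]),
   ("PB", ["83", "Paraíba", "Paraiba"]),
   ("PE", ["81", "87", "Pernambuco"]),
   ("PI", ["86", "89", "Piauí", "Piaui"]),
   ("RN", ["84", "Rio Grande do Norte"]),
   ("SE", ["79", "Sergipe"]),
   ("AC", ["68", "Acre"]),
   ("AP", ["96", "Amapá", "Amapa"]),
   ("AM", ["92", "97", "Amazonas"]),
   ("PA", ["91", "93", "94", "Para", "Pará"]),
   ("RO", ["69", "Rondônia", "Rondonia"]),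
   ("RR", ["95", "Roraima"]),
   ("TO", ["63", "Tocantins"]),
   ("ES", ["27", "28", "Espírito Santo", "Espirito Santo"]),
   ("MG", ["31", "32", "33", "34", "35", "37", "38", "Minas Gerais"]),
   ("RJ", ["21", "22", "24", "Rio de Janeiro"]),
   ("SP", ["11", "12", "13", "14", "15", "16", "17", "18", "19", "São Paulo", "Sao Paulo"]),
   ("PR", ["41", "42", "43", "44", "45", "46", "Paraná", "Parana"]),
   ("RS", ["51", "53", "54", "55", "Rio Grande do Sul"]),
   ("SC", ["47", "48", "49", "Santa Catarina"])]

-- A's loop: for index, values in enumerate(states.values()): if ddd in values: state = list(states.keys())[index]; break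
-- the index is always in range when reached, so xs[index] is pyGet? ... |>.getD ddd (default never used).
def pvLoopA (ddd : String) : List (Int × List String) → String
  | [] => ddd
  | (i, vs) :: rest =>
      if vs.contains ddd then
        (PySem.List.pyGet? (PySem.Dict.keys (PySem.Dict.mk pvStates)) i).getD ddd
      else pvLoopA ddd rest

def find_by_ddd (ddd : String) : String :=
  pvLoopA ddd (PySem.List.enumerate (PySem.Dict.values (PySem.Dict.mk pvStates)))

-- ===== PORT B =====
-- B's precomputed reverse index _STATE_BY_ALIAS (module-level literal dict in Source B):
def pvLookupB : PySem.Dict String String :=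
  PySem.Dict.mk
  [("61", "DF"), ("Distrito Federal", "DF"),
   ("62", "GO"), ("64", "GO"), ("Goiania", "GO"), ("Goiânia", "GO"),
   ("65", "MT"), ("66", "MT"), ("Mato Grosso", "MT"),
   ("67", "MS"), ("Mato Grosso do Sul", "MS"),
   ("82", "AL"), ("Alagoas", "AL"),
   ("71", "BA"), ("73", "BA"), ("74", "BA"), ("75", "BA"), ("77", "BA"), ("Bahia", "BA"),
   ("85", "CE"), ("88", "CE"), ("Ceará", "CE"), ("Ceara", "CE"),
   ("98", "MA"), ("99", "MA"), ("Maranhão", "MA"), ("Maranhao", "MA"),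
   ("83", "PB"), ("Paraíba", "PB"), ("Paraiba", "PB"),
   ("81", "PE"), ("87", "PE"), ("Pernambuco", "PE"),
   ("86", "PI"), ("89", "PI"), ("Piauí", "PI"), ("Piaui", "PI"),
   ("84", "RN"), ("Rio Grande do Norte", "RN"),
   ("79", "SE"), ("Sergipe", "SE"),
   ("68", "AC"), ("Acre", "AC"),
   ("96", "AP"), ("Amapá", "AP"), ("Amapa", "AP"),
   ("92", "AM"), ("97", "AM"), ("Amazonas", "AM"),
   ("91", "PA"), ("93", "PA"), ("94", "PA"), ("Para", "PA"), ("Pará", "PA"),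
   ("69", "RO"), ("Rondônia", "RO"), ("Rondonia", "RO"),
   ("95", "RR"), ("Roraima", "RR"),
   ("63", "TO"), ("Tocantins", "TO"),
   ("27", "ES"), ("28", "ES"), ("Espírito Santo", "ES"), ("Espirito Santo", "ES"),
   ("31", "MG"), ("32", "MG"), ("33", "MG"), ("34", "MG"), ("35", "MG"), ("37", "MG"), ("38", "MG"), ("Minas Gerais", "MG"),
   ("21", "RJ"), ("22", "RJ"), ("24", "RJ"), ("Rio de Janeiro", "RJ"),
   ("11", "SP"), ("12", "SP"), ("13", "SP"), ("14", "SP"), ("15", "SP"), ("16", "SP"), ("17", "SP"), ("18", "SP"), ("19", "SP"), ("São Paulo", "SP"), ("Sao Paulo", "SP"),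
   ("41", "PR"), ("42", "PR"), ("43", "PR"), ("44", "PR"), ("45", "PR"), ("46", "PR"), ("Paraná", "PR"), ("Parana", "PR"),
   ("51", "RS"), ("53", "RS"), ("54", "RS"), ("55", "RS"), ("Rio Grande do Sul", "RS"),
   ("47", "SC"), ("48", "SC"), ("49", "SC"), ("Santa Catarina", "SC")]

def find_by_ddd_alt (ddd : String) : String :=
  PySem.Dict.getD pvLookupB ddd ddd

-- ===== PRECONDITION & SPEC =====
def Spec_find_by_ddd (ddd : String) (out : String) : Prop := out = find_by_ddd_alt ddd
instance (ddd : String) (out : String) : Decidable (Spec_find_by_ddd ddd out) := by unfold Spec_find_by_ddd; infer_instance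

-- ===== CLAIM (what is proved, stated in full; the proofs are below) =====
def Claim_equal_find_by_ddd : Prop := ∀ (ddd : String), Dom_find_by_ddd ddd → Spec_find_by_ddd ddd (find_by_ddd ddd)

-- ===== LEMMAS AND PROOFS =====

-- clean group scan both sides will be related to
def pvScan (ddd : String) : List (String × List String) → String
  | [] => ddd
  | (k, vs) :: rest => if vs.contains ddd then k else pvScan ddd rest

lemma pvLoopA_eq_scan (ddd : String) : ∀ (post pre : List (String × List String)),
    pvStates = pre ++ post →
    pvLoopA ddd (PySem.List.enumerate (post.map Prod.snd) pre.length) = pvScan ddd post := by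
  intro post
  induction post with
  | nil => intro pre _; simp [pvLoopA, pvScan]
  | cons g rest ih =>
      intro pre hpre
      obtain ⟨k, vs⟩ := g
      simp only [List.map_cons, PySem.List.enumerate_cons, pvLoopA, pvScan]
      by_cases h : vs.contains ddd
      · simp only [h, if_true]
        have hk : PySem.List.pyGet? (PySem.Dict.keys (PySem.Dict.mk pvStates)) (pre.length : Int)
            = some k := by
          rw [hpre]
          simp [PySem.Dict.keys]
        rw [hk]; rfl
      · simp only [h]
        have := ih (pre ++ [(k, vs)]) (by simp [hpre])
        simpa using this

lemma pvFlat_group (ddd k : String) : ∀ (vs : List String) (tail : List (String × String)),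
    PySem.Dict.getD (PySem.Dict.mk (vs.map (fun v => (v, k)) ++ tail)) ddd ddd
      = if vs.contains ddd then k else PySem.Dict.getD (PySem.Dict.mk tail) ddd ddd
  | [], tail => by simp only [List.map_nil, List.nil_append]; rfl
  | v :: vs, tail => by
      simp only [List.map_cons, List.cons_append, PySem.Dict.getD_eq_get?_getD,
        PySem.Dict.get?_mk_cons, List.contains_cons]
      by_cases h : v = ddd
      · simp only [h, beq_self_eq_true, if_true, Bool.true_or, Option.getD_some]
      · have h1 : (v == ddd) = false := beq_eq_false_iff_ne.mpr h
        have h2 : (ddd == v) = false := beq_eq_false_iff_ne.mpr (fun e => h e.symm)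
        simp only [h1, h2, Bool.false_eq_true, if_false, Bool.false_or,
          ← PySem.Dict.getD_eq_get?_getD, pvFlat_group ddd k vs tail]

lemma pvScan_eq_flat (ddd : String) : ∀ (gs : List (String × List String)),
    pvScan ddd gs =
      (PySem.Dict.getD (PySem.Dict.mk (gs.flatMap (fun p => p.2.map (fun v => (v, p.1))))) ddd ddd)
  | [] => by rfl
  | (k, vs) :: rest => by
      simp only [pvScan, List.flatMap_cons, pvFlat_group, pvScan_eq_flat ddd rest]

set_option maxRecDepth 4096 in
lemma pvLookupB_eq : pvLookupB = PySem.Dict.mk (pvStates.flatMap (fun p => p.2.map (fun v => (v, p.1)))) := by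
  rfl

-- ===== VERDICT (by name: the statement is the Claim_ definition above) =====
theorem find_by_ddd_spec : Claim_equal_find_by_ddd := by
  intro ddd _
  unfold Spec_find_by_ddd find_by_ddd find_by_ddd_alt
  rw [pvLookupB_eq, ← pvScan_eq_flat]
  have h := pvLoopA_eq_scan ddd pvStates [] rfl
  simpa [PySem.Dict.values] using h
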